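-- pv_equiv track=rewrite | github.com/vikasmunshi/euler | euler_solver/solutions/solutions_0001_0100/solution_0081/solution.py | move_diagonally
-- ===== SOURCE A (Python) =====
-- from typing import Any, Generator, List
--
-- def move_diagonally(size: int) -> Generator[tuple[int, int], None, None]:
--     row, col = (size - 1, size - 1)
--     while row >= 0:
--         yield row, col
--         row, col = (row - 1, col + 1)
--         if row < 0:
--             row, col = (col - 2, 0)
--         if col >= size:
--             col, row = (row, size - 1)
-- ===== SOURCE B (Python) =====
-- from typing import Generator
--
-- def move_diagonally(size: int) -> Generator[tuple[int, int], None, None]: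
--     for s in range(2 * size - 2, -1, -1):
--         for row in range(min(size - 1, s), max(0, s - size + 1) - 1, -1):
--             yield row, s - row
-- ===== Notes on version B (the rewrite author's own statement) =====
-- stated objective: simpler
-- what changed: Replaced the single stateful while-loop, which steps one cell at a time and re-seeds the state with two corrective branches when it falls off the top or right edge, by two nested for-loops: an outer loop over the anti-diagonal sums in decreasing order and an inner loop over each diagonal's closed-form row range, yielding the pair of row and the diagonal sum minus row.
import Mathlib
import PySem

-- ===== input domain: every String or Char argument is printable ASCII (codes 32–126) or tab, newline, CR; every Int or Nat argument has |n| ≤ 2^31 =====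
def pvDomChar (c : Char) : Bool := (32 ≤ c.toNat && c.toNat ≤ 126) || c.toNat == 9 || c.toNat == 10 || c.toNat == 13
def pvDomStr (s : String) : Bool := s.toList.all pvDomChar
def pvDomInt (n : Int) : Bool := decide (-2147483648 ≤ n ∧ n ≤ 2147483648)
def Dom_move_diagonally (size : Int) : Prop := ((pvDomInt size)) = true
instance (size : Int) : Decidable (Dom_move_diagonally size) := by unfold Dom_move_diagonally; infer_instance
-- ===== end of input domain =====

-- B replaces A's single stateful while-loop with corrective re-seeding branches by two nested
-- closed-form range loops over anti-diagonals (objective: simpler).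


-- ===== PORT A =====
-- A's while-loop; fuel is a totality device only (2*size^2+1 steps are proved sufficient:
-- the loop yields size^2 pairs and then stops), the loop body is A's, branch for branch.
def pvLoopA (size : Int) (fuel : Nat) (row col : Int) : List (Int × Int) :=
  match fuel with
  | 0 => []
  | Nat.succ n =>
    if row < 0 then []
    else
      let row1 := row - 1
      let col1 := col + 1
      let st1 := if row1 < 0 then (col1 - 2, (0 : Int)) else (row1, col1)
      let st2 := if st1.2 ≥ size then ((size - 1 : Int), st1.1) else st1
      (row, col) :: pvLoopA size n st2.1 st2.2

def move_diagonally (size : Int) : List (Int × Int) :=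
  pvLoopA size (2 * size.toNat * size.toNat + 1) (size - 1) (size - 1)

-- ===== PORT B =====
def move_diagonally_alt (size : Int) : List (Int × Int) :=
  (PySem.List.pyRange (2 * size - 2) (-1) (-1)).flatMap (fun s =>
    (PySem.List.pyRange (min (size - 1) s) (max 0 (s - size + 1) - 1) (-1)).map
      (fun row => (row, s - row)))

-- ===== PRECONDITION & SPEC =====
def Spec_move_diagonally (size : Int) (out : List (Int × Int)) : Prop := out = move_diagonally_alt size
instance (size : Int) (out : List (Int × Int)) : Decidable (Spec_move_diagonally size out) := by unfold Spec_move_diagonally; infer_instance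

-- ===== CLAIM (what is proved, stated in full; the proofs are below) =====
def Claim_equal_move_diagonally : Prop := ∀ (size : Int), Dom_move_diagonally size → Spec_move_diagonally size (move_diagonally size)

-- ===== LEMMAS AND PROOFS =====

-- one anti-diagonal (B's inner loop) and the suffix of B's output from diagonal s downward
def pvDiag (size s : Int) : List (Int × Int) :=
  (PySem.List.pyRange (min (size - 1) s) (max 0 (s - size + 1) - 1) (-1)).map
    (fun row => (row, s - row))

def pvTail (size s : Int) : List (Int × Int) :=
  (PySem.List.pyRange s (-1) (-1)).flatMap (pvDiag size)

lemma pvLoopA_neg (size : Int) (fuel : Nat) (row col : Int) (h : row < 0) :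
    pvLoopA size fuel row col = [] := by
  cases fuel <;> simp [pvLoopA, h]

lemma pvTail_nil (size s : Int) (h : s ≤ -1) : pvTail size s = [] := by
  simp [pvTail, PySem.List.pyRange_neg_one_eq_nil h]

lemma pvTail_cons (size s : Int) (h : 0 ≤ s) :
    pvTail size s = pvDiag size s ++ pvTail size (s - 1) := by
  rw [pvTail, PySem.List.pyRange_neg_one_cons (by omega), List.flatMap_cons]
  rfl

lemma pvAlt_eq_tail (size : Int) : move_diagonally_alt size = pvTail size (2 * size - 2) := rfl

-- loop invariant: inside diagonal s at row `row` (col = s - row), the loop emits the rest of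
-- that diagonal and then all lower diagonals
lemma pvLoop_spec (size : Int) (hsz : 1 ≤ size) :
    ∀ (fuel : Nat) (s row : Int), 0 ≤ s → s ≤ 2 * size - 2 →
      max 0 (s - size + 1) ≤ row → row ≤ min (size - 1) s →
      (row - max 0 (s - size + 1) + 1) + s * size ≤ (fuel : Int) →
      pvLoopA size fuel row (s - row) =
        ((PySem.List.pyRange row (max 0 (s - size + 1) - 1) (-1)).map (fun r => (r, s - r)))
          ++ pvTail size (s - 1) := by
  intro fuel
  induction fuel with
  | zero =>
    intro s row hs0 _ hlo hhi hb
    exfalso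
    have hmul : 0 ≤ s * size := mul_nonneg hs0 (by omega)
    push_cast at hb
    linarith
  | succ n ih =>
    intro s row hs0 hs1 hlo hhi hb
    have hrow0 : ¬ row < 0 := by omega
    rw [pvLoopA, if_neg hrow0]
    by_cases hmid : max 0 (s - size + 1) < row
    · -- not at the bottom of the diagonal: plain step to (row-1, s-(row-1))
      have h1 : ¬ row - 1 < 0 := by omega
      have h2 : ¬ s - row + 1 ≥ size := by omega
      simp only [if_neg h1, if_neg h2]
      have hrec := ih s (row - 1) hs0 hs1 (by omega) (by omega)
        (by push_cast at hb ⊢; linarith)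
      have hcol : s - row + 1 = s - (row - 1) := by ring
      rw [hcol, hrec]
      conv_rhs => rw [PySem.List.pyRange_neg_one_cons
        (show max 0 (s - size + 1) - 1 < row from by omega)]
      simp
    · -- bottom of the diagonal
      have hrow : row = max 0 (s - size + 1) := by omega
      have hlist : (PySem.List.pyRange row (max 0 (s - size + 1) - 1) (-1)).map
          (fun r => (r, s - r)) = [(row, s - row)] := by
        rw [PySem.List.pyRange_neg_one_cons (by omega),
            PySem.List.pyRange_neg_one_eq_nil (by omega)]
        simp
      rw [hlist]
      by_cases hsmall : s ≤ size - 1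
      · -- left edge: row = 0, A reseeds to (s-1, 0)
        have hr0 : row = 0 := by omega
        have h1 : row - 1 < 0 := by omega
        have h2 : ¬ (0 : Int) ≥ size := by omega
        simp only [if_pos h1, if_neg h2]
        by_cases hz : s = 0
        · -- last cell: next row is -1, the loop ends
          subst hz
          rw [pvLoopA_neg size n _ 0 (by omega), pvTail_nil size _ (by omega)]
          simp
        · have hrec := ih (s - 1) (s - 1) (by omega) (by omega) (by omega) (by omega)
            (by
              push_cast at hb ⊢
              have e : (s - 1) * size = s * size - size := by ring
              have m1 : max 0 (s - size + 1) = 0 := by omega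
              have m2 : max 0 (s - 1 - size + 1) = 0 := by omega
              rw [m1] at hb
              rw [m2, e]
              linarith)
          have hc : s - row + 1 - 2 = s - 1 := by omega
          have hc2 : (0 : Int) = (s - 1) - (s - 1) := by ring
          rw [hc, hc2, hrec]
          conv_rhs => rw [pvTail_cons size (s - 1) (by omega)]
          have hd : pvDiag size (s - 1) =
              (PySem.List.pyRange (s - 1) (max 0 (s - 1 - size + 1) - 1) (-1)).map
                (fun r => (r, s - 1 - r)) := by
            simp only [pvDiag]
            rw [show min (size - 1) (s - 1) = s - 1 from by omega]
          rw [hd]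
          simp
      · -- right edge: the col would reach size, A reseeds to (size-1, s-size)
        have h1 : ¬ row - 1 < 0 := by omega
        have h2 : s - row + 1 ≥ size := by omega
        simp only [if_neg h1, if_pos h2]
        have hrec := ih (s - 1) (size - 1) (by omega) (by omega) (by omega) (by omega)
          (by
            push_cast at hb ⊢
            have e : (s - 1) * size = s * size - size := by ring
            have m1 : max 0 (s - size + 1) = s - size + 1 := by omega
            have m2 : max 0 (s - 1 - size + 1) = s - size := by omega
            rw [m1] at hb
            rw [m2, e]
            linarith)
        have hc : row - 1 = (s - 1) - (size - 1) := by omega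
        rw [hc, hrec]
        conv_rhs => rw [pvTail_cons size (s - 1) (by omega)]
        have hd : pvDiag size (s - 1) =
            (PySem.List.pyRange (size - 1) (max 0 (s - 1 - size + 1) - 1) (-1)).map
              (fun r => (r, s - 1 - r)) := by
          simp only [pvDiag]
          rw [show min (size - 1) (s - 1) = size - 1 from by omega]
        rw [hd]
        simp

-- ===== VERDICT (by name: the statement is the Claim_ definition above) =====
theorem move_diagonally_spec : Claim_equal_move_diagonally := by
  intro size _hdom
  unfold Spec_move_diagonally
  by_cases hsz : 1 ≤ size
  · have h := pvLoop_spec size hsz (2 * size.toNat * size.toNat + 1) (2 * size - 2) (size - 1)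
      (by omega) (by omega) (by omega) (by omega)
      (by
        have ht : ((2 * size.toNat * size.toNat + 1 : Nat) : Int) = 2 * size * size + 1 := by
          push_cast
          rw [Int.toNat_of_nonneg (by omega : (0 : Int) ≤ size)]
        rw [ht, show max 0 (2 * size - 2 - size + 1) = size - 1 from by omega]
        nlinarith)
    rw [show (2 * size - 2) - (size - 1) = size - 1 from by ring] at h
    rw [move_diagonally, h, pvAlt_eq_tail]
    conv_rhs => rw [pvTail_cons size (2 * size - 2) (by omega)]
    congr 1
    simp only [pvDiag]
    rw [show min (size - 1) (2 * size - 2) = size - 1 from by omega,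
        show max 0 (2 * size - 2 - size + 1) = size - 1 from by omega]
  · rw [move_diagonally, pvLoopA_neg _ _ _ _ (by omega), pvAlt_eq_tail,
      pvTail_nil _ _ (by omega)]
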